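-- pv_equiv track=rewrite | github.com/lucashca/TCC-IA-PY | som/teste.py | createClassName
-- ===== SOURCE A (Python) =====
-- def createClassName(x,y):
--     className = {}
--     cont = 0
--     for i in range(x):
--         for j in range(y):
--             cont = cont + 1
--             key = (i,j)
--             value = str(cont)
--             className.__setitem__(key,value)
--     return className
-- ===== SOURCE B (Python) =====
-- def createClassName(x, y):
--     # Flat enumeration: one pass over the linear index k = 0..x*y-1; the cell is
--     # recovered by divmod(k, y) and the label is k+1. No nested loops, no counter.
--     if x <= 0 or y <= 0:
--         return {}
--     return {divmod(k, y): str(k + 1) for k in range(x * y)}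
-- ===== Notes on version B (the rewrite author's own statement) =====
-- stated objective: alternative
-- what changed: Replaces the nested row/column loops with a running counter by a single flat loop over the linear index k in range(x*y), recovering the cell as divmod(k, y) and the label as str(k+1); an explicit empty-grid early return covers non-positive dimensions.
import Mathlib
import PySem

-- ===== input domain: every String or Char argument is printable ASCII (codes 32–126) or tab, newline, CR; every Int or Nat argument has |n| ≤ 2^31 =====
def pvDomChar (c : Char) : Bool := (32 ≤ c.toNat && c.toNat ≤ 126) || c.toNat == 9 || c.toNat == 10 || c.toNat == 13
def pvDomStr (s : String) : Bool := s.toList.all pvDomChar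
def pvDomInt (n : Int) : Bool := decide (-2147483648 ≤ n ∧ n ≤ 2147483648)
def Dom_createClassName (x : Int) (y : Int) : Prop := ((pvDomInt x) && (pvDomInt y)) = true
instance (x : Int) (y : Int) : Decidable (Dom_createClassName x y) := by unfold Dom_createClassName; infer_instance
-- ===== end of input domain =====

-- B replaces A's nested loops + running counter with ONE flat loop over the linear
-- index k in range(x*y), recovering the cell by divmod(k, y); alternative decomposition, same O(x*y) cost.


-- ===== PORT A =====
def createClassName (x : Int) (y : Int) : List (Int × Int × String) :=
  (((PySem.List.pyRange 0 x 1).foldl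
      (fun (st : PySem.Dict (Int × Int) String × Int) i =>
        (PySem.List.pyRange 0 y 1).foldl
          (fun st j => (st.1.insert (i, j) (PySem.Int.toStr (st.2 + 1)), st.2 + 1)) st)
      (PySem.Dict.empty, 0)).1.items).map (fun p => (p.1.1, p.1.2, p.2))

-- ===== PORT B =====
-- The comprehension's keys divmod(k, y) are pairwise distinct, so the built dict's
-- items are exactly the generated pairs in generation order; the port produces that list.
def createClassName_alt (x : Int) (y : Int) : List (Int × Int × String) :=
  if x ≤ 0 ∨ y ≤ 0 then []
  else (PySem.List.pyRange 0 (x * y) 1).map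
    (fun k => (PySem.Int.floordiv k y, PySem.Int.mod k y, PySem.Int.toStr (k + 1)))

-- ===== PRECONDITION & SPEC =====
def Spec_createClassName (x : Int) (y : Int) (out : List (Int × Int × String)) : Prop := out = createClassName_alt x y
instance (x : Int) (y : Int) (out : List (Int × Int × String)) : Decidable (Spec_createClassName x y out) := by unfold Spec_createClassName; infer_instance

-- ===== CLAIM (what is proved, stated in full; the proofs are below) =====
def Claim_equal_createClassName : Prop := ∀ (x : Int) (y : Int), Dom_createClassName x y → Spec_createClassName x y (createClassName x y)

-- ===== LEMMAS AND PROOFS =====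

-- Inner loop over one row i: starting at count c from a dict whose keys never have
-- first component i, it appends the row's fresh entries and advances the count.
lemma pv_inner (i : Int) (m : Nat) (d : PySem.Dict (Int × Int) String) (c : Int)
    (hfresh : ∀ j : Int, d.contains (i, j) = false) :
    (((List.range m).map (fun (k : Nat) => ((0:Int) + (k:Int)))).foldl
        (fun (st : PySem.Dict (Int × Int) String × Int) j =>
          (st.1.insert (i, j) (PySem.Int.toStr (st.2 + 1)), st.2 + 1)) (d, c))
    = (PySem.Dict.mk (d.items ++ (List.range m).map
          (fun (k : Nat) => (((i, (k:Int)) : Int × Int), PySem.Int.toStr (c + (k:Int) + 1)))),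
       c + (m:Int)) := by
  induction m with
  | zero =>
    simp
  | succ n ih =>
    rw [List.range_succ, List.map_append, List.foldl_append, ih, List.map_append]
    have hcontains :
        (PySem.Dict.mk (d.items ++ (List.range n).map
          (fun (k : Nat) => (((i, (k:Int)) : Int × Int), PySem.Int.toStr (c + (k:Int) + 1))))).contains
          (i, (0:Int) + (n:Int)) = false := by
      rw [PySem.Dict.contains_mk]
      simp only [List.any_append, List.any_map, Bool.or_eq_false_iff]
      constructor
      · rw [List.any_eq_false]
        intro p hp
        have := hfresh ((0:Int) + (n:Int))
        rw [PySem.Dict.contains] at this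
        rw [List.any_eq_false] at this
        exact this p hp
      · rw [List.any_eq_false]
        intro k hk
        simp only [Function.comp, beq_iff_eq, Prod.mk.injEq]
        intro ⟨_, h2⟩
        have hkn : (k : Int) = (n : Int) := by omega
        have : k = n := by exact_mod_cast hkn
        simp [this] at hk
    simp only [List.map_cons, List.map_nil, List.foldl_cons, List.foldl_nil]
    congr 1
    · apply PySem.Dict.ext
      show _ = _
      rw [PySem.Dict.items_insert_of_not_contains _ _ hcontains]
      simp only [List.append_assoc]
      congr 2
      ring_nf
    · push_cast
      ring

-- Outer loop: after n rows the dict holds all cells of rows 0..n-1 with row-major labels,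
-- and the counter equals n * (number of columns).
lemma pv_outer (y : Int) (n : Nat) :
    (((List.range n).map (fun (k : Nat) => ((0:Int) + (k:Int)))).foldl
        (fun (st : PySem.Dict (Int × Int) String × Int) i =>
          (PySem.List.pyRange 0 y 1).foldl
            (fun st j => (st.1.insert (i, j) (PySem.Int.toStr (st.2 + 1)), st.2 + 1)) st)
        (PySem.Dict.empty, 0))
    = (PySem.Dict.mk ((List.range n).flatMap (fun (iN : Nat) =>
          (List.range y.toNat).map (fun (k : Nat) =>
            ((((iN:Int), (k:Int)) : Int × Int), PySem.Int.toStr ((iN:Int) * y + (k:Int) + 1))))),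
       (n:Int) * ((y.toNat:Nat):Int)) := by
  induction n with
  | zero =>
    simp [PySem.Dict.empty]
  | succ n ih =>
    rw [List.range_succ, List.map_append, List.foldl_append, ih]
    simp only [List.map_cons, List.map_nil, List.foldl_cons, List.foldl_nil]
    have hfresh : ∀ j : Int,
        (PySem.Dict.mk ((List.range n).flatMap (fun (iN : Nat) =>
          (List.range y.toNat).map (fun (k : Nat) =>
            ((((iN:Int), (k:Int)) : Int × Int), PySem.Int.toStr ((iN:Int) * y + (k:Int) + 1)))))).contains
          ((0:Int) + (n:Int), j) = false := by
      intro j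
      rw [PySem.Dict.contains_mk, List.any_eq_false]
      intro p hp
      simp only [List.mem_flatMap, List.mem_map, List.mem_range] at hp
      obtain ⟨iN, hiN, k, hk, rfl⟩ := hp
      simp only [beq_iff_eq, Prod.mk.injEq]
      intro ⟨h1, _⟩
      have : (iN : Int) = (n : Int) := by omega
      have : iN = n := by exact_mod_cast this
      omega
    rw [PySem.List.pyRange_one, show ((y : Int) - 0).toNat = y.toNat by omega]
    rw [pv_inner _ y.toNat _ _ hfresh]
    rw [List.flatMap_append]
    congr 1
    · apply PySem.Dict.ext
      show _ = _
      simp only [List.flatMap_cons, List.flatMap_nil, List.append_nil]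
      congr 1
      apply List.map_congr_left
      intro k hk
      rw [List.mem_range] at hk
      have hy : ((y.toNat : Nat) : Int) = y := by omega
      congr 2
      · omega
      · congr 1
        rw [hy]
    · push_cast
      have hy : 0 ≤ y ∨ y.toNat = 0 := by omega
      rcases hy with hy | hy
      · have : ((y.toNat : Nat) : Int) = y ∨ y.toNat = 0 := by omega
        rcases this with h | h
        · rw [h]; ring
        · simp [h]
      · simp [hy]

-- A flat range of a*b split into a blocks of b (row-major).
lemma pv_range_mul {α : Type} (a b : Nat) (g : Nat → α) :
    (List.range (a * b)).map g
      = (List.range a).flatMap (fun i => (List.range b).map (fun j => g (i * b + j))) := by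
  induction a with
  | zero => simp
  | succ n ih =>
    rw [Nat.succ_mul, List.range_add, List.map_append, List.map_map, ih,
        List.range_succ, List.flatMap_append]
    simp [Function.comp]

-- ===== VERDICT (by name: the statement is the Claim_ definition above) =====
theorem createClassName_spec : Claim_equal_createClassName := by
  intro x y _
  unfold Spec_createClassName createClassName createClassName_alt
  rw [PySem.List.pyRange_one 0 x, show ((x : Int) - 0).toNat = x.toNat by omega]
  rw [pv_outer y x.toNat]
  by_cases h : x ≤ 0 ∨ y ≤ 0
  · rw [if_pos h]
    rcases h with h | h
    · rw [show x.toNat = 0 by omega]; simp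
    · rw [show y.toNat = 0 by omega]; simp
  · rw [if_neg h]
    push Not at h
    obtain ⟨hx, hy⟩ := h
    have hy' : ((y.toNat : Nat) : Int) = y := by omega
    have hxy : x * y = ((x.toNat * y.toNat : Nat) : Int) := by
      push_cast
      rw [hy', show ((x.toNat : Nat) : Int) = x by omega]
    rw [PySem.List.pyRange_one 0 (x * y), hxy,
        show (((x.toNat * y.toNat : Nat) : Int) - 0).toNat = x.toNat * y.toNat by omega]
    rw [pv_range_mul x.toNat y.toNat]
    simp only [List.map_flatMap, List.map_map]
    apply List.flatMap_congr
    intro iN _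
    apply List.map_congr_left
    intro k hk
    rw [List.mem_range] at hk
    have hcell : (0:Int) + ((iN * y.toNat + k : Nat) : Int) = (iN : Int) * y + (k : Int) := by
      push_cast
      rw [hy']
      ring
    simp only [Function.comp, hcell]
    have hdiv : PySem.Int.floordiv ((iN : Int) * y + (k : Int)) y = (iN : Int) := by
      rw [PySem.Int.floordiv_eq_iff_of_pos hy]
      constructor
      · nlinarith
      · have hklt : (k : Int) < y := by omega
        nlinarith
    have hmod : PySem.Int.mod ((iN : Int) * y + (k : Int)) y = (k : Int) := by
      have := PySem.Int.floordiv_mul_add_mod ((iN : Int) * y + (k : Int)) y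
      rw [hdiv] at this
      omega
    rw [hdiv, hmod]
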